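-- pv_equiv track=rewrite | github.com/MrBrantCode/unitest_baseline | mut_generate/mist_train_taco/taco_8000/solution.py | is_berland_flag_valid
-- ===== SOURCE A (Python) =====
-- def is_berland_flag_valid(n, m, flag):
--     def check_stripes(stripes):
--         if len(stripes) == 3 and stripes[0][1] == stripes[1][1] == stripes[2][1]:
--             if stripes[0][0] != stripes[1][0] and stripes[0][0] != stripes[2][0] and stripes[1][0] != stripes[2][0]:
--                 return True
--         return False
--
--     # Check horizontal stripes
--     horizontal = []
--     f1 = True
--     for i in range(n):
--         if flag[i] == flag[i][0] * m:
--             if i == 0: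
--                 horizontal.append([flag[i], 1])
--             elif flag[i] == horizontal[-1][0]:
--                 horizontal[-1][1] += 1
--             else:
--                 horizontal.append([flag[i], 1])
--         else:
--             f1 = False
--             break
--     if not check_stripes(horizontal):
--         f1 = False
--
--     # Check vertical stripes
--     new_flag = ['' for _ in range(m)]
--     for i in range(n):
--         for j in range(m):
--             new_flag[j] += flag[i][j]
--     vertical = []
--     f2 = True
--     for i in range(m):
--         if new_flag[i] == new_flag[i][0] * n:
--             if i == 0:
--                 vertical.append([new_flag[i], 1])
--             elif new_flag[i] == vertical[-1][0]:
--                 vertical[-1][1] += 1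
--             else:
--                 vertical.append([new_flag[i], 1])
--         else:
--             f2 = False
--             break
--     if not check_stripes(vertical):
--         f2 = False
--
--     # Determine the result
--     if f1 or f2:
--         return "YES"
--     else:
--         return "NO"
-- ===== SOURCE B (Python) =====
-- def is_berland_flag_valid(n, m, flag):
--     # Divisibility + wholesale comparison against the ideal three-striped flag,
--     # on the declared n x m grid (first n rows, first m characters per column).
--     def stripes_ok(lines, k, w):
--         if k <= 0 or k % 3 != 0 or len(lines) != k:
--             return False
--         t = k // 3
--         a, b, c = lines[0][:1], lines[t][:1], lines[2 * t][:1]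
--         if not a or a == b or a == c or b == c:
--             return False
--         return lines == [a * w] * t + [b * w] * t + [c * w] * t
--
--     rows = flag[:n]
--     cols = [''.join(r[j] for r in rows) for j in range(m)]
--     return "YES" if stripes_ok(rows, n, m) or stripes_ok(cols, m, n) else "NO"
-- ===== Notes on version B (the rewrite author's own statement) =====
-- stated objective: simpler
-- what changed: B replaces A's run-length grouping of rows/columns (with last-run bumping and a 3-run check) by a direct divisibility test k % 3 == 0, sampling the three stripe colors, and one wholesale comparison of the n x m grid against the constructed ideal three-striped flag.
import Mathlib
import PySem

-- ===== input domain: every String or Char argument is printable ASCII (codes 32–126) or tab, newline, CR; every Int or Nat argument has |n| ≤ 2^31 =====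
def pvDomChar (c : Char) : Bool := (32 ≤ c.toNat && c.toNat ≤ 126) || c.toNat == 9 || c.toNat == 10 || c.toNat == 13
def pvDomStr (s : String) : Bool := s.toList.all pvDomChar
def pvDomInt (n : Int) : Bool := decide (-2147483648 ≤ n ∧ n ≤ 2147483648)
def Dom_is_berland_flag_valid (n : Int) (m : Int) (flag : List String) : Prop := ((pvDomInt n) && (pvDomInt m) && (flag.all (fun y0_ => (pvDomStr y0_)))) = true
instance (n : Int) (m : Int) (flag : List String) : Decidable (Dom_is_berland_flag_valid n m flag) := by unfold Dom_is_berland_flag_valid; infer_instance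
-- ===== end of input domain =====

-- B replaces A's run-length grouping of rows/columns by a divisibility test plus a wholesale
-- comparison against the ideal three-striped flag (simpler); return-value equivalence on well-formed n×m flags.

-- ===== PORT A =====
-- strings are carried as their character lists (List Char); row/col comparisons are list equality

-- check_stripes(stripes)
def pvCheckStripes (st : List (List Char × Int)) : Bool :=
  match st with
  | [p, q, r] =>
    if p.2 == q.2 && q.2 == r.2 then
      p.1 != q.1 && p.1 != r.1 && q.1 != r.1
    else false
  | _ => false

-- loop body: append a new run or bump the last one (i is the Python loop index)
def pvStepA (acc : List (List Char × Int)) (i : Int) (r : List Char) : List (List Char × Int) :=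
  if i == 0 then acc ++ [(r, 1)]
  else
    match acc.getLast? with
    | some p => if r == p.1 then acc.dropLast ++ [(p.1, p.2 + 1)] else acc ++ [(r, 1)]
    | none => acc ++ [(r, 1)]

-- the grouping loop with its break, over the Python loop indices (range(n) / range(m))
def pvScanA (g : List (List Char)) (L : Int) : List Int → List (List Char × Int) → List (List Char × Int) × Bool
  | [], acc => (acc, true)
  | i :: rest, acc =>
    let r := PySem.List.pyGetD g i []
    if r == List.replicate L.toNat (r.headD ' ') then
      pvScanA g L rest (pvStepA acc i r)
    else (acc, false)

-- new_flag construction: the literal nested index loop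
def pvBuildCols (g : List (List Char)) (n : Int) (m : Int) : List (List Char) :=
  (PySem.List.pyRange 0 n 1).foldl (fun nf i =>
    (PySem.List.pyRange 0 m 1).foldl (fun nf2 j =>
      PySem.List.pySetD nf2 j
        (PySem.List.pyGetD nf2 j [] ++ [PySem.List.pyGetD (PySem.List.pyGetD g i []) j ' '])) nf)
    (List.replicate m.toNat [])

def is_berland_flag_valid (n : Int) (m : Int) (flag : List String) : String :=
  let g := flag.map String.toList
  let h := pvScanA g m (PySem.List.pyRange 0 n 1) []
  let f1 := h.2 && pvCheckStripes h.1
  let cols := pvBuildCols g n m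
  let v := pvScanA cols n (PySem.List.pyRange 0 m 1) []
  let f2 := v.2 && pvCheckStripes v.1
  if f1 || f2 then "YES" else "NO"

-- ===== PORT B =====
-- stripes_ok(lines, k, w)
def pvStripesOk (g : List (List Char)) (k : Int) (w : Int) : Bool :=
  if k ≤ 0 || PySem.Int.mod k 3 != 0 || ((g.length : Int) != k) then false
  else
    let t := PySem.Int.floordiv k 3
    let a := PySem.List.slice (PySem.List.pyGetD g 0 []) none (some 1)
    let b := PySem.List.slice (PySem.List.pyGetD g t []) none (some 1)
    let c := PySem.List.slice (PySem.List.pyGetD g (2 * t) []) none (some 1)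
    if a == ([] : List Char) || a == b || a == c || b == c then false
    else
      g == List.replicate t.toNat (PySem.List.pyRepeat a w) ++
           List.replicate t.toNat (PySem.List.pyRepeat b w) ++
           List.replicate t.toNat (PySem.List.pyRepeat c w)

def is_berland_flag_valid_alt (n : Int) (m : Int) (flag : List String) : String :=
  let g := flag.map String.toList
  let rows := PySem.List.slice g none (some n)
  let cols := (PySem.List.pyRange 0 m 1).map (fun j => rows.map (fun r => PySem.List.pyGetD r j ' '))
  if pvStripesOk rows n m || pvStripesOk cols m n then "YES" else "NO"

-- ===== PRECONDITION & SPEC =====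
-- Pre_ is exactly the set of inputs on which A returns normally: either a declared n x m grid is
-- really present (n, m positive, at least n rows, the first n rows at least m wide), or m ≤ 0, where
-- A only touches flag[0] (and raises unless n ≤ 0 or flag[0] is a nonempty string).
def Pre_is_berland_flag_valid (n : Int) (m : Int) (flag : List String) : Prop :=
  (0 < n ∧ 0 < m ∧ n ≤ (flag.length : Int) ∧
    ∀ s ∈ flag.take n.toNat, m ≤ (s.toList.length : Int)) ∨
  (m ≤ 0 ∧ (n ≤ 0 ∨ (flag.headD "").toList ≠ []))
instance (n : Int) (m : Int) (flag : List String) : Decidable (Pre_is_berland_flag_valid n m flag) := by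
  unfold Pre_is_berland_flag_valid; infer_instance

def pvWitness_is_berland_flag_valid : Int × Int × List String := (3, 1, ["a", "b", "c"])

def Spec_is_berland_flag_valid (n : Int) (m : Int) (flag : List String) (out : String) : Prop := out = is_berland_flag_valid_alt n m flag
instance (n : Int) (m : Int) (flag : List String) (out : String) : Decidable (Spec_is_berland_flag_valid n m flag out) := by unfold Spec_is_berland_flag_valid; infer_instance

-- ===== CLAIM (what is proved, stated in full; the proofs are below) =====
def Claim_equal_is_berland_flag_valid : Prop := ∀ (n : Int) (m : Int) (flag : List String), Dom_is_berland_flag_valid n m flag → Pre_is_berland_flag_valid n m flag → Spec_is_berland_flag_valid n m flag (is_berland_flag_valid n m flag)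

-- ===== LEMMAS AND PROOFS =====

def pvStepC (acc : List (Char × Int)) (ch : Char) : List (Char × Int) :=
  match acc.getLast? with
  | some p => if ch == p.1 then acc.dropLast ++ [(p.1, p.2 + 1)] else acc ++ [(ch, 1)]
  | none => acc ++ [(ch, 1)]

def pvRleC (cs : List Char) : List (Char × Int) := cs.foldl pvStepC []

def pvCheckC (st : List (Char × Int)) : Bool :=
  match st with
  | [p, q, r] =>
    if p.2 == q.2 && q.2 == r.2 then
      p.1 != q.1 && p.1 != r.1 && q.1 != r.1
    else false
  | _ => false

def pvStriped (cs : List Char) : Prop :=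
  ∃ a b c t, 0 < t ∧ a ≠ b ∧ a ≠ c ∧ b ≠ c ∧
    cs = List.replicate t a ++ List.replicate t b ++ List.replicate t c

def pvLift (w : Nat) (p : Char × Int) : List Char × Int := (List.replicate w p.1, p.2)

lemma pvReplBeq (w : Nat) (hw : 0 < w) (c d : Char) :
    (List.replicate w c == List.replicate w d) = (c == d) := by
  by_cases h : c = d
  · simp [h]
  · simp [h]
    omega

lemma pvRleC_snoc (cs : List Char) (c : Char) :
    pvRleC (cs ++ [c]) = pvStepC (pvRleC cs) c := by
  simp [pvRleC, List.foldl_append]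

lemma pvRleC_decode (cs : List Char) :
    (∀ p ∈ pvRleC cs, 1 ≤ p.2) ∧
    (pvRleC cs).flatMap (fun p => List.replicate p.2.toNat p.1) = cs ∧
    (pvRleC cs).IsChain (fun p q => p.1 ≠ q.1) := by
  induction cs using List.reverseRecOn with
  | nil => simp [pvRleC]
  | append_singleton xs x ih =>
    obtain ⟨hcnt, hdec, hch⟩ := ih
    rw [pvRleC_snoc]
    cases hL : (pvRleC xs).getLast? with
    | none =>
      have hnil : pvRleC xs = [] := List.getLast?_eq_none_iff.mp hL
      have hstep : pvStepC (pvRleC xs) x = pvRleC xs ++ [(x, 1)] := by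
        unfold pvStepC; rw [hL]
      rw [hnil] at hdec
      simp at hdec
      subst hdec
      rw [hstep]
      simp [pvRleC]
    | some p =>
      obtain ⟨ys, hys⟩ := List.getLast?_eq_some_iff.mp hL
      have hp2 : 1 ≤ p.2 := hcnt p (by rw [hys]; simp)
      have hstep : pvStepC (pvRleC xs) x =
          (if x == p.1 then (pvRleC xs).dropLast ++ [(p.1, p.2 + 1)] else pvRleC xs ++ [(x, 1)]) := by
        unfold pvStepC; rw [hL]
      rw [hstep, hys, List.dropLast_concat]
      rw [hys] at hcnt hdec hch
      by_cases hx : x = p.1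
      · rw [if_pos (by simp [hx])]
        refine ⟨?_, ?_, ?_⟩
        · intro q hq
          rcases List.mem_append.mp hq with h | h
          · exact hcnt q (List.mem_append_left _ h)
          · simp at h; rw [h]; omega
        · rw [List.flatMap_append] at hdec ⊢
          simp only [List.flatMap_cons, List.flatMap_nil, List.append_nil] at hdec ⊢
          have htn : (p.2 + 1).toNat = p.2.toNat + 1 := by omega
          rw [htn, List.replicate_succ', ← List.append_assoc, hdec, hx]
        · rw [List.isChain_append] at hch ⊢
          obtain ⟨h1, _, h3⟩ := hch
          exact ⟨h1, by simp, by simpa using h3⟩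
      · rw [if_neg (by simp [hx])]
        refine ⟨?_, ?_, ?_⟩
        · intro q hq
          rcases List.mem_append.mp hq with h | h
          · exact hcnt q h
          · simp at h; simp [h]
        · rw [List.flatMap_append, hdec]
          simp
        · rw [List.isChain_append]
          refine ⟨hch, by simp, ?_⟩
          intro a ha b hb
          simp at ha hb
          subst hb
          subst ha
          exact fun h => hx h.symm

lemma pvStepC_of_ne (acc : List (Char × Int)) (ch : Char)
    (h : ∀ p, acc.getLast? = some p → p.1 ≠ ch) :
    pvStepC acc ch = acc ++ [(ch, 1)] := by
  unfold pvStepC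
  cases hL : acc.getLast? with
  | none => rfl
  | some p =>
    simp only []
    rw [if_neg (by simpa using (h p hL).symm)]

lemma pvStepC_last (ys : List (Char × Int)) (d : Char) (c : Int) :
    pvStepC (ys ++ [(d, c)]) d = ys ++ [(d, c + 1)] := by
  unfold pvStepC
  rw [List.getLast?_concat]
  simp only []
  rw [if_pos (by simp), List.dropLast_concat]

lemma pvRleC_append_replicate (xs : List Char) (b : Char) (t : Nat) (ht : 0 < t)
    (h : ∀ p, (pvRleC xs).getLast? = some p → p.1 ≠ b) :
    pvRleC (xs ++ List.replicate t b) = pvRleC xs ++ [(b, (t : Int))] := by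
  induction t with
  | zero => omega
  | succ t ih =>
    rcases Nat.eq_zero_or_pos t with ht0 | ht0
    · subst ht0
      rw [List.replicate_one, pvRleC_snoc, pvStepC_of_ne _ _ h]
      norm_num
    · rw [List.replicate_succ', ← List.append_assoc, pvRleC_snoc, ih ht0, pvStepC_last]
      push_cast
      ring_nf

lemma pvRleC_replicate (a : Char) (t : Nat) (ht : 0 < t) :
    pvRleC (List.replicate t a) = [(a, (t : Int))] := by
  have := pvRleC_append_replicate [] a t ht (by simp [pvRleC])
  simpa [pvRleC] using this

lemma pvCheckStripes_map (w : Nat) (hw : 0 < w) (st : List (Char × Int)) :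
    pvCheckStripes (st.map (pvLift w)) = pvCheckC st := by
  rcases st with _ | ⟨p, _ | ⟨q, _ | ⟨r, _ | rest⟩⟩⟩ <;>
    simp only [List.map_cons, List.map_nil, pvCheckStripes, pvCheckC, pvLift] <;> try rfl
  have h1 := pvReplBeq w hw p.1 q.1
  have h2 := pvReplBeq w hw p.1 r.1
  have h3 := pvReplBeq w hw q.1 r.1
  simp only [bne, h1, h2, h3]

lemma pvCoreIff (cs : List Char) : pvCheckC (pvRleC cs) = true ↔ pvStriped cs := by
  constructor
  · intro h
    obtain ⟨hcnt, hdec, hch⟩ := pvRleC_decode cs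
    rcases hR : pvRleC cs with _ | ⟨p, _ | ⟨q, _ | ⟨r, _ | rest⟩⟩⟩ <;>
      rw [hR] at h <;> simp [pvCheckC] at h
    obtain ⟨⟨hpq, hqr⟩, ⟨h1, h2⟩, h3⟩ := h
    rw [hR] at hcnt hdec
    have hp : 1 ≤ p.2 := hcnt p (by simp)
    refine ⟨p.1, q.1, r.1, p.2.toNat, by omega, h1, h2, h3, ?_⟩
    rw [← hdec]
    simp [List.flatMap_cons, hpq, hqr]
  · rintro ⟨a, b, c, t, ht, hab, hac, hbc, rfl⟩
    have h1 : pvRleC (List.replicate t a) = [(a, (t : Int))] := pvRleC_replicate a t ht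
    have h2 : pvRleC (List.replicate t a ++ List.replicate t b)
        = [(a, (t : Int)), (b, (t : Int))] := by
      rw [pvRleC_append_replicate _ _ _ ht
        (by rw [h1]; rintro p hp; simp at hp; rw [← hp]; exact hab), h1]
      rfl
    have h3 : pvRleC (List.replicate t a ++ List.replicate t b ++ List.replicate t c)
        = [(a, (t : Int)), (b, (t : Int)), (c, (t : Int))] := by
      rw [pvRleC_append_replicate _ _ _ ht
        (by rw [h2]; rintro p hp; simp at hp; rw [← hp]; exact hbc), h2]
      rfl
    rw [h3]
    simp [pvCheckC, hab, hac, hbc]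

lemma pvGetBlock (cs : List Char) (a b c : Char) (t : Nat) (ht : 0 < t)
    (h : cs = List.replicate t a ++ List.replicate t b ++ List.replicate t c) :
    cs.getD 0 ' ' = a ∧ cs.getD t ' ' = b ∧ cs.getD (2 * t) ' ' = c := by
  subst h
  refine ⟨?_, ?_, ?_⟩
  · rcases Nat.exists_eq_add_of_lt ht with ⟨t', rfl⟩
    simp [List.replicate_succ]
  · rw [List.getD_eq_getElem?_getD, List.append_assoc,
      List.getElem?_append_right (by simp), List.length_replicate]
    simp only [Nat.sub_self]
    rcases Nat.exists_eq_add_of_lt ht with ⟨t', rfl⟩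
    simp [List.replicate_succ]
  · rw [List.getD_eq_getElem?_getD, List.getElem?_append_right (by simp [two_mul]),
      List.length_append, List.length_replicate, List.length_replicate]
    have : 2 * t - (t + t) = 0 := by omega
    rw [this]
    rcases Nat.exists_eq_add_of_lt ht with ⟨t', rfl⟩
    simp [List.replicate_succ]

def pvColFn (g : List (List Char)) (mm : Nat) : List (List Char) :=
  (List.range mm).map (fun j => g.map (fun row => row.getD j ' '))

lemma pvColsB_eq (g : List (List Char)) (m : Int) (hm : 0 ≤ m) :
    (PySem.List.pyRange 0 m 1).map (fun j => g.map (fun row => PySem.List.pyGetD row j ' '))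
      = pvColFn g m.toNat := by
  rw [PySem.List.pyRange_one, List.map_map]
  unfold pvColFn
  simp

lemma pvInnerLoop (row : List Char) (mm : Nat) :
    ∀ (nf : List (List Char)), mm ≤ nf.length →
    (PySem.List.pyRange 0 (mm : Int) 1).foldl (fun nf2 j =>
      PySem.List.pySetD nf2 j
        (PySem.List.pyGetD nf2 j [] ++ [PySem.List.pyGetD row j ' '])) nf
      = nf.mapIdx (fun j s => if j < mm then s ++ [PySem.List.pyGetD row (j : Int) ' '] else s) := by
  induction mm with
  | zero =>
    intro nf _
    rw [PySem.List.pyRange_one_eq_nil (by norm_num)]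
    simp only [List.foldl_nil]
    apply List.ext_getElem (by simp)
    intro i h1 h2
    simp [List.getElem_mapIdx]
  | succ mm ih =>
    intro nf hle
    have hcast : ((mm : Int) + 1) = ((mm + 1 : Nat) : Int) := by push_cast; ring
    rw [← hcast, PySem.List.pyRange_one_succ_right (by positivity), List.foldl_append]
    rw [ih nf (by omega)]
    set M := nf.mapIdx (fun j s => if j < mm then s ++ [PySem.List.pyGetD row (j : Int) ' '] else s) with hM
    have hMlen : M.length = nf.length := by simp [hM]
    simp only [List.foldl_cons, List.foldl_nil]
    rw [PySem.List.pySetD_natCast, PySem.List.pyGetD_natCast]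
    apply List.ext_getElem (by simp [hMlen])
    intro i h1 h2
    rw [List.getElem_set]
    by_cases hi : i = mm
    · subst hi
      have hMi : M.getD i [] = nf[i] := by
        rw [List.getD_eq_getElem?_getD, List.getElem?_eq_getElem (by omega : i < M.length)]
        simp only [hM, List.getElem_mapIdx]
        simp
        rfl
      rw [if_pos rfl, List.getElem_mapIdx, if_pos (by omega)]
      rw [hMi]
      rfl
    · rw [if_neg (by omega : ¬ mm = i)]
      simp only [hM, List.getElem_mapIdx]
      rcases Nat.lt_or_ge i mm with h | h
      · rw [if_pos h, if_pos (by omega)]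
      · rw [if_neg (by omega), if_neg (by omega)]

lemma pvOuterLoop (mm : Nat) (gs : List (List Char)) :
    ∀ (nf : List (List Char)), nf.length = mm →
    gs.foldl (fun acc row =>
      (PySem.List.pyRange 0 (mm : Int) 1).foldl (fun nf2 j =>
        PySem.List.pySetD nf2 j
          (PySem.List.pyGetD nf2 j [] ++ [PySem.List.pyGetD row j ' '])) acc) nf
      = nf.mapIdx (fun j s => s ++ gs.map (fun row => PySem.List.pyGetD row (j : Int) ' ')) := by
  induction gs with
  | nil =>
    intro nf _
    simp only [List.foldl_nil, List.map_nil, List.append_nil]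
    apply List.ext_getElem (by simp)
    intro i h1 h2
    simp [List.getElem_mapIdx]
  | cons row rest ih =>
    intro nf hnf
    simp only [List.foldl_cons]
    rw [pvInnerLoop row mm nf (by omega)]
    have hstep : nf.mapIdx (fun j s => if j < mm then s ++ [PySem.List.pyGetD row (j : Int) ' '] else s)
        = nf.mapIdx (fun j s => s ++ [PySem.List.pyGetD row (j : Int) ' ']) := by
      apply List.ext_getElem (by simp)
      intro i h1 h2
      simp only [List.getElem_mapIdx]
      rw [if_pos (by simp at h1; omega)]
    rw [hstep, ih _ (by simp [hnf])]
    apply List.ext_getElem (by simp)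
    intro i h1 h2
    simp only [List.getElem_mapIdx, List.map_cons]
    rw [List.append_assoc]
    rfl

-- A's grouping loop re-expressed over the rows it actually visits (proof device)
def pvScanRows (L : Int) : List (List Char) → Int → List (List Char × Int) → List (List Char × Int) × Bool
  | [], _, acc => (acc, true)
  | r :: rest, i, acc =>
    if r == List.replicate L.toNat (r.headD ' ') then
      pvScanRows L rest (i + 1) (pvStepA acc i r)
    else (acc, false)

lemma pvScanBridge (g : List (List Char)) (L : Int) :
    ∀ (k a : Nat) (acc : List (List Char × Int)), a + k ≤ g.length →
    pvScanA g L (PySem.List.pyRange (a : Int) ((a + k : Nat) : Int) 1) acc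
      = pvScanRows L ((g.drop a).take k) (a : Int) acc := by
  intro k
  induction k with
  | zero =>
    intro a acc _
    rw [Nat.add_zero, PySem.List.pyRange_one_eq_nil (le_refl _)]
    simp [pvScanA, pvScanRows]
  | succ k ih =>
    intro a acc hle
    have hlt : (a : Int) < ((a + (k + 1) : Nat) : Int) := by push_cast; omega
    rw [PySem.List.pyRange_one_cons hlt]
    have ha : a < g.length := by omega
    have hget : PySem.List.pyGetD g (a : Int) [] = g[a] := by
      rw [PySem.List.pyGetD_natCast, List.getD_eq_getElem?_getD, List.getElem?_eq_getElem ha]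
      rfl
    have hdrop : (g.drop a).take (k + 1) = g[a] :: ((g.drop (a + 1)).take k) := by
      rw [← List.getElem_cons_drop (h := ha), List.take_succ_cons]
    rw [hdrop]
    simp only [pvScanA, pvScanRows, hget]
    have hc1 : (a : Int) + 1 = ((a + 1 : Nat) : Int) := by push_cast; ring
    have hc2 : ((a + (k + 1) : Nat) : Int) = (((a + 1) + k : Nat) : Int) := by push_cast; ring
    split
    · rw [hc1, hc2]
      exact ih (a + 1) _ (by omega)
    · rfl

lemma pvScanRows_snd_false (L : Int) (g : List (List Char)) (r : List Char) (hr : r ∈ g)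
    (hbad : r ≠ List.replicate L.toNat (r.headD ' ')) :
    ∀ (i : Int) (acc : List (List Char × Int)), (pvScanRows L g i acc).2 = false := by
  induction g with
  | nil => cases hr
  | cons x rest ih =>
    intro i acc
    unfold pvScanRows
    rcases List.mem_cons.mp hr with h | h
    · subst h
      rw [if_neg (by simpa using hbad)]
    · split
      · exact ih h _ _
      · rfl

lemma pvStepA_lift (w : Nat) (hw : 0 < w) (i : Int) (accC : List (Char × Int))
    (h0 : i = 0 → accC = []) (c : Char) :
    pvStepA (accC.map (pvLift w)) i (List.replicate w c) = (pvStepC accC c).map (pvLift w) := by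
  by_cases hi : i = 0
  · rw [h0 hi, hi]
    simp [pvStepA, pvStepC, pvLift]
  · have hi0 : (i == 0) = false := by simpa using hi
    unfold pvStepA pvStepC
    rw [List.getLast?_map, hi0]
    cases hL : accC.getLast? with
    | none => simp [pvLift]
    | some p =>
      simp only [Option.map_some, Bool.false_eq_true, if_false, pvLift]
      rw [pvReplBeq w hw c p.1]
      by_cases hc : c = p.1
      · simp [hc, pvLift, ← List.map_dropLast]
      · simp [hc, pvLift]

lemma pvScanRows_map (w : Nat) (hw : 0 < w) (L : Int) (hL : L.toNat = w) :
    ∀ (cs : List Char) (i : Int) (accC : List (Char × Int)), 0 ≤ i → (i = 0 → accC = []) →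
    pvScanRows L (cs.map (fun c => List.replicate w c)) i (accC.map (pvLift w))
      = ((cs.foldl pvStepC accC).map (pvLift w), true) := by
  intro cs
  induction cs with
  | nil => intro i accC _ _; simp [pvScanRows]
  | cons c rest ih =>
    intro i accC hi0 h0
    simp only [List.map_cons, List.foldl_cons]
    unfold pvScanRows
    have huni : (List.replicate w c ==
        List.replicate L.toNat ((List.replicate w c).headD ' ')) = true := by
      rw [hL]
      rcases Nat.exists_eq_add_of_lt hw with ⟨w', rfl⟩
      simp [List.replicate_succ]
    rw [if_pos huni, pvStepA_lift w hw i accC h0 c]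
    exact ih (i + 1) (pvStepC accC c) (by omega) (by omega)

lemma pvSingBeq (c d : Char) : (([c] : List Char) == [d]) = (c == d) := by
  by_cases h : c = d
  · simp [h]
  · simp [h]

lemma pvTake1 (l : List Char) : l.take 1 = [] ∨ ∃ ch, l.take 1 = [ch] ∧ l.headD ' ' = ch := by
  cases l with
  | nil => left; rfl
  | cons x xs => right; exact ⟨x, by simp, rfl⟩

lemma pvSlice1 (l : List Char) : PySem.List.slice l none (some 1) = l.take 1 := by
  have := PySem.List.slice_to (xs := l) (b := 1) (by norm_num)
  simpa using this


lemma pvSliceRepl (w : Nat) (hw : 0 < w) (c : Char) :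
    PySem.List.slice (List.replicate w c) none (some 1) = [c] := by
  rw [pvSlice1, List.take_replicate]
  rw [show min 1 w = 1 by omega]
  rfl

lemma pvSingNeNil (c : Char) : (([c] : List Char) == []) = false := by
  rw [beq_eq_false_iff_ne]
  simp

lemma pvStripesOkIff (w : Nat) (hw : 0 < w) (cs : List Char) (W : Int) (hW : W.toNat = w) :
    pvStripesOk (cs.map (fun c => List.replicate w c)) ((cs.length : Int)) W = true ↔ pvStriped cs := by
  have hS : Function.Injective (fun c : Char => List.replicate w c) :=
    List.replicate_right_injective hw.ne'
  unfold pvStripesOk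
  rw [show ((cs.length : Int) ≤ 0 || PySem.Int.mod (cs.length : Int) 3 != 0 ||
      (((cs.map (fun c => List.replicate w c)).length : Int) != (cs.length : Int)))
      = ((cs.length : Int) ≤ 0 || PySem.Int.mod (cs.length : Int) 3 != 0) from by simp]
  by_cases hcond : ((cs.length : Int) ≤ 0 || PySem.Int.mod (cs.length : Int) 3 != 0) = true
  · rw [if_pos hcond]
    simp only [Bool.false_eq_true, false_iff]
    rintro ⟨a, b, c, t, ht, hab, hac, hbc, rfl⟩
    simp only [Bool.or_eq_true, bne_iff_ne, ne_eq, decide_eq_true_eq] at hcond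
    rcases hcond with h | h
    · simp at h; omega
    · apply h
      rw [PySem.Int.mod_eq_zero_iff_dvd]
      simp only [List.length_append, List.length_replicate]
      exact ⟨(t : Int), by push_cast; ring⟩
  · rw [if_neg hcond]
    simp only [Bool.or_eq_true, not_or, Bool.not_eq_true, bne_eq_false_iff_eq,
      decide_eq_false_iff_not, not_le] at hcond
    obtain ⟨hkpos, hmod⟩ := hcond
    have hklen : 0 < cs.length := by exact_mod_cast hkpos
    have hdvd : 3 ∣ cs.length := by
      have := (PySem.Int.mod_eq_zero_iff_dvd _ _).mp hmod
      exact_mod_cast this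
    obtain ⟨tN, hlen3⟩ := hdvd
    have htN : 0 < tN := by omega
    have ht : PySem.Int.floordiv (cs.length : Int) 3 = (tN : Int) := by
      rw [PySem.Int.floordiv_eq_ediv_of_pos (by norm_num), hlen3]
      push_cast
      omega
    have h2t : 2 * PySem.Int.floordiv (cs.length : Int) 3 = ((2 * tN : Nat) : Int) := by
      rw [ht]; push_cast; ring
    have hget : ∀ (j : Nat), j < cs.length →
        PySem.List.pyGetD (cs.map (fun c => List.replicate w c)) ((j : Nat) : Int) []
          = List.replicate w (cs.getD j ' ') := by
      intro j hj
      rw [PySem.List.pyGetD_natCast]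
      simp [List.getD_eq_getElem?_getD, List.getElem?_eq_getElem hj,
        List.getElem?_eq_getElem (by simpa using hj : j < (cs.map (fun c => List.replicate w c)).length)]
    have hg0 : PySem.List.pyGetD (cs.map (fun c => List.replicate w c)) 0 []
        = List.replicate w (cs.getD 0 ' ') := by
      have := hget 0 hklen
      simpa using this
    have hgt : PySem.List.pyGetD (cs.map (fun c => List.replicate w c))
        (PySem.Int.floordiv (cs.length : Int) 3) [] = List.replicate w (cs.getD tN ' ') := by
      rw [ht]; exact hget tN (by omega)
    have hg2t : PySem.List.pyGetD (cs.map (fun c => List.replicate w c))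
        (2 * PySem.Int.floordiv (cs.length : Int) 3) [] = List.replicate w (cs.getD (2 * tN) ' ') := by
      rw [h2t]; exact hget (2 * tN) (by omega)
    have httoNat : (PySem.Int.floordiv (cs.length : Int) 3).toNat = tN := by rw [ht]; simp
    simp only [hg0, hgt, hg2t, pvSliceRepl w hw, httoNat, pvSingNeNil, pvSingBeq,
      PySem.List.pyRepeat_singleton, hW, Bool.false_or]
    set a := cs.getD 0 ' ' with ha
    set b := cs.getD tN ' ' with hb
    set c := cs.getD (2 * tN) ' ' with hc
    by_cases hdis : (a == b || a == c || b == c) = true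
    · rw [if_pos hdis]
      simp only [Bool.false_eq_true, false_iff]
      rintro ⟨a', b', c', t', ht', hab, hac, hbc, heq⟩
      have hlen' : cs.length = 3 * t' := by
        rw [heq]; simp only [List.length_append, List.length_replicate]; ring
      have ht'' : t' = tN := by omega
      obtain ⟨e1, e2, e3⟩ := pvGetBlock cs a' b' c' t' ht' heq
      rw [ht''] at e2; rw [ht''] at e3
      rw [← ha] at e1; rw [← hb] at e2; rw [← hc] at e3
      simp only [Bool.or_eq_true, beq_iff_eq] at hdis
      rcases hdis with (h | h) | h
      · exact hab (e1 ▸ e2 ▸ h)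
      · exact hac (e1 ▸ e3 ▸ h)
      · exact hbc (e2 ▸ e3 ▸ h)
    · rw [if_neg hdis]
      simp only [Bool.or_eq_true, beq_iff_eq, not_or] at hdis
      obtain ⟨⟨hab, hac⟩, hbc⟩ := hdis
      have hrhs : (List.replicate tN (List.replicate w a) ++ List.replicate tN (List.replicate w b) ++
          List.replicate tN (List.replicate w c)) =
          (List.replicate tN a ++ List.replicate tN b ++ List.replicate tN c).map
            (fun c : Char => List.replicate w c) := by
        simp [List.map_replicate]
      rw [hrhs]
      constructor
      · intro h
        have h' : cs.map (fun c : Char => List.replicate w c) =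
            (List.replicate tN a ++ List.replicate tN b ++ List.replicate tN c).map
              (fun c : Char => List.replicate w c) := by simpa using h
        exact ⟨a, b, c, tN, htN, hab, hac, hbc, List.map_injective_iff.mpr hS h'⟩
      · rintro ⟨a', b', c', t', ht', hab', hac', hbc', heq⟩
        have hlen' : cs.length = 3 * t' := by
          rw [heq]; simp only [List.length_append, List.length_replicate]; ring
        have ht'' : t' = tN := by omega
        obtain ⟨e1, e2, e3⟩ := pvGetBlock cs a' b' c' t' ht' heq
        rw [ht''] at e2; rw [ht''] at e3
        rw [← ha] at e1; rw [← hb] at e2; rw [← hc] at e3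
        rw [← e1] at heq; rw [← e2] at heq; rw [← e3] at heq
        rw [ht''] at heq
        rw [heq]
        simp

lemma pvStripesOk_false_of_bad (w : Nat) (hw : 0 < w) (g : List (List Char))
    (hlen : ∀ r ∈ g, w ≤ r.length) (r : List Char) (hr : r ∈ g)
    (hbad : r ≠ List.replicate w (r.headD ' ')) (k W : Int) (hW : W.toNat = w) :
    pvStripesOk g k W = false := by
  unfold pvStripesOk
  split_ifs with h1
  · rfl
  simp only []
  split_ifs with h2
  · rfl
  rw [beq_eq_false_iff_ne]
  intro heq
  have hr' := heq ▸ hr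
  have hrepl : ∃ x, r = PySem.List.pyRepeat x W ∧
      (x = [] ∨ ∃ ch, x = [ch]) := by
    have hx : ∀ (l : List Char), PySem.List.slice l none (some 1) = [] ∨
        ∃ ch, PySem.List.slice l none (some 1) = [ch] := by
      intro l
      rw [pvSlice1]
      rcases pvTake1 l with h | ⟨ch, h, _⟩
      · exact Or.inl h
      · exact Or.inr ⟨ch, h⟩
    rcases List.mem_append.mp hr' with h | h
    · rcases List.mem_append.mp h with h' | h'
      · refine ⟨_, List.eq_of_mem_replicate h', ?_⟩
        rcases hx (PySem.List.pyGetD g 0 []) with h'' | ⟨ch, h''⟩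
        · exact Or.inl h''
        · exact Or.inr ⟨ch, h''⟩
      · refine ⟨_, List.eq_of_mem_replicate h', ?_⟩
        rcases hx (PySem.List.pyGetD g (PySem.Int.floordiv k 3) []) with h'' | ⟨ch, h''⟩
        · exact Or.inl h''
        · exact Or.inr ⟨ch, h''⟩
    · refine ⟨_, List.eq_of_mem_replicate h, ?_⟩
      rcases hx (PySem.List.pyGetD g (2 * PySem.Int.floordiv k 3) []) with h'' | ⟨ch, h''⟩
      · exact Or.inl h''
      · exact Or.inr ⟨ch, h''⟩
  obtain ⟨x, hxr, hcase⟩ := hrepl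
  rcases hcase with hnil | ⟨ch, hch⟩
  · rw [hnil] at hxr
    simp [PySem.List.pyRepeat] at hxr
    have := hlen r hr
    rw [hxr] at this
    simp at this
    omega
  · rw [hch, PySem.List.pyRepeat_singleton, hW] at hxr
    apply hbad
    rw [hxr]
    congr 1
    rcases Nat.exists_eq_add_of_lt hw with ⟨w', rfl⟩
    simp [List.replicate_succ]

lemma pvMaster (w : Nat) (hw : 0 < w) (g : List (List Char)) (hlen : ∀ r ∈ g, w ≤ r.length)
    (L W : Int) (hL : L.toNat = w) (hW : W.toNat = w) :
    ((pvScanRows L g 0 []).2 && pvCheckStripes (pvScanRows L g 0 []).1)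
      = pvStripesOk g ((g.length : Int)) W := by
  by_cases hall : ∀ r ∈ g, r = List.replicate L.toNat (r.headD ' ')
  · have hg : g = (g.map (fun r => r.headD ' ')).map (fun c => List.replicate w c) := by
      rw [List.map_map]
      conv_lhs => rw [← List.map_id g]
      apply List.map_congr_left
      intro r hr
      have h := hall r hr
      rw [hL] at h
      simpa using h
    set cs := g.map (fun r => r.headD ' ') with hcs
    have hlencs : cs.length = g.length := by simp [hcs]
    have hscan : pvScanRows L (cs.map (fun c => List.replicate w c)) 0 (([] : List (Char × Int)).map (pvLift w))
        = ((cs.foldl pvStepC []).map (pvLift w), true) :=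
      pvScanRows_map w hw L hL cs 0 [] (le_refl 0) (fun _ => rfl)
    simp only [List.map_nil] at hscan
    rw [hg, hscan]
    simp only [Bool.true_and]
    rw [pvCheckStripes_map w hw]
    have h1 := pvCoreIff cs
    have h2 := pvStripesOkIff w hw cs W hW
    rw [hlencs] at h2
    rw [Bool.eq_iff_iff]
    rw [show ((cs.map (fun c => List.replicate w c)).length : Int) = (g.length : Int) by
      simp [hlencs]]
    exact h1.trans h2.symm
  · push_neg at hall
    obtain ⟨r, hr, hbad⟩ := hall
    rw [pvScanRows_snd_false L g r hr hbad 0 []]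
    rw [pvStripesOk_false_of_bad w hw g hlen r hr (by rwa [hL] at hbad) _ W hW]
    rfl

lemma pvBuildCols_eq (g : List (List Char)) (n m : Int) (hn0 : 0 ≤ n)
    (hnle : n.toNat ≤ g.length) (hm : 0 ≤ m) :
    pvBuildCols g n m = pvColFn (g.take n.toNat) m.toNat := by
  unfold pvBuildCols
  have hbody : ∀ (acc : List (List Char)) (i : Int), i ∈ PySem.List.pyRange 0 n 1 →
      (PySem.List.pyRange 0 m 1).foldl (fun nf2 j =>
        PySem.List.pySetD nf2 j
          (PySem.List.pyGetD nf2 j [] ++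
            [PySem.List.pyGetD (PySem.List.pyGetD g i []) j ' '])) acc
      = (PySem.List.pyRange 0 m 1).foldl (fun nf2 j =>
        PySem.List.pySetD nf2 j
          (PySem.List.pyGetD nf2 j [] ++
            [PySem.List.pyGetD (PySem.List.pyGetD (g.take n.toNat) i []) j ' '])) acc := by
    intro acc i hi
    rw [PySem.List.mem_pyRange_one] at hi
    have hglt : i.toNat < g.length := by omega
    have : PySem.List.pyGetD g i [] = PySem.List.pyGetD (g.take n.toNat) i [] := by
      have hilt : i.toNat < n.toNat := by omega
      rw [PySem.List.pyGetD_of_nonneg g [] (by omega),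
          PySem.List.pyGetD_of_nonneg (g.take n.toNat) [] (by omega)]
      simp [List.getD_eq_getElem?_getD, List.getElem?_take, hilt, List.getElem?_eq_getElem hglt]
    rw [this]
  refine Eq.trans (PySem.List.foldl_congr_mem _ _ _ (List.replicate m.toNat []) hbody) ?_
  set G := g.take n.toNat with hG
  rw [show n = ((G.length : Nat) : Int) by rw [hG, List.length_take_of_le hnle]; omega]
  rw [PySem.List.foldl_pyRange_zero_pyGetD'
    (f := fun acc row => (PySem.List.pyRange 0 m 1).foldl (fun nf2 j =>
      PySem.List.pySetD nf2 j
        (PySem.List.pyGetD nf2 j [] ++ [PySem.List.pyGetD row j ' '])) acc)]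
  rw [show m = ((m.toNat : Nat) : Int) from (Int.toNat_of_nonneg hm).symm]
  rw [pvOuterLoop m.toNat (g.take n.toNat) (List.replicate ((m.toNat : Nat) : Int).toNat []) (by simp; omega)]
  apply List.ext_getElem (by simp [pvColFn])
  intro i h1 h2
  simp only [List.getElem_mapIdx, pvColFn]
  simp [List.getElem_replicate]
  rw [hG, List.map_take]

lemma pvStripesOk_degen (g' : List (List Char)) (k W : Int) (hW : W ≤ 0)
    (hhead : g'.headD [] ≠ []) : pvStripesOk g' k W = false := by
  unfold pvStripesOk
  split_ifs with h1
  · rfl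
  simp only []
  split_ifs with h2
  · rfl
  rw [beq_eq_false_iff_ne]
  intro heq
  simp only [Bool.or_eq_true, not_or, Bool.not_eq_true, bne_eq_false_iff_eq,
    decide_eq_false_iff_not, not_le] at h1
  obtain ⟨⟨hkpos, hmod⟩, hklen⟩ := h1
  have hdvd : (3 : Int) ∣ k := (PySem.Int.mod_eq_zero_iff_dvd _ _).mp hmod
  have hk3 : 3 ≤ k := by
    obtain ⟨c, rfl⟩ := hdvd
    omega
  have ht1 : 1 ≤ PySem.Int.floordiv k 3 := by
    rw [PySem.Int.floordiv_eq_ediv_of_pos (by norm_num)]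
    omega
  obtain ⟨t', ht'⟩ : ∃ t', (PySem.Int.floordiv k 3).toNat = t' + 1 :=
    ⟨(PySem.Int.floordiv k 3).toNat - 1, by omega⟩
  rw [ht'] at heq
  have hrep : PySem.List.pyRepeat (PySem.List.slice (PySem.List.pyGetD g' 0 []) none (some 1)) W
      = [] := by
    simp [PySem.List.pyRepeat, hW]
  rw [List.replicate_succ, hrep] at heq
  rw [heq] at hhead
  simp at hhead

-- ===== VERDICT (by name: the statement is the Claim_ definition above) =====
theorem is_berland_flag_valid_spec : Claim_equal_is_berland_flag_valid := by
  intro n m flag _ hpre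
  unfold Spec_is_berland_flag_valid is_berland_flag_valid is_berland_flag_valid_alt
  set g := flag.map String.toList with hg
  rcases hpre with ⟨hn, hm, hnle, hrows⟩ | ⟨hm0, hdeg⟩
  · have hnleg : n.toNat ≤ g.length := by
      have : (g.length : Int) = (flag.length : Int) := by simp [hg]
      omega
    have hslice : PySem.List.slice g none (some n) = g.take n.toNat :=
      PySem.List.slice_to (xs := g) (b := n) hn.le
    have hrowsg : ∀ r ∈ g.take n.toNat, m.toNat ≤ r.length := by
      intro r hr
      rw [hg, ← List.map_take, List.mem_map] at hr
      obtain ⟨s, hs, rfl⟩ := hr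
      have := hrows s hs
      omega
    have hwm : 0 < m.toNat := by omega
    have hwn : 0 < n.toNat := by omega
    have htklen : (((g.take n.toNat).length : Nat) : Int) = n := by
      rw [List.length_take_of_le hnleg]
      exact Int.toNat_of_nonneg hn.le
    have hb1 : pvScanA g m (PySem.List.pyRange 0 n 1) [] = pvScanRows m (g.take n.toNat) 0 [] := by
      have h := pvScanBridge g m n.toNat 0 [] (by omega)
      simp only [Nat.cast_zero, Nat.zero_add, List.drop_zero] at h
      rwa [Int.toNat_of_nonneg hn.le] at h
    have hmas1 := pvMaster m.toNat hwm (g.take n.toNat) hrowsg m m rfl rfl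
    rw [htklen] at hmas1
    have hf1 : ((pvScanA g m (PySem.List.pyRange 0 n 1) []).2 &&
        pvCheckStripes (pvScanA g m (PySem.List.pyRange 0 n 1) []).1)
        = pvStripesOk (PySem.List.slice g none (some n)) n m := by
      rw [hb1, hmas1, hslice]
    have hcolsA : pvBuildCols g n m = pvColFn (g.take n.toNat) m.toNat :=
      pvBuildCols_eq g n m hn.le hnleg hm.le
    have hcolsB : (PySem.List.pyRange 0 m 1).map
        (fun j => (PySem.List.slice g none (some n)).map (fun r => PySem.List.pyGetD r j ' '))
        = pvColFn (g.take n.toNat) m.toNat := by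
      rw [hslice]
      exact pvColsB_eq (g.take n.toNat) m hm.le
    have hcolslen : (pvColFn (g.take n.toNat) m.toNat).length = m.toNat := by
      simp [pvColFn]
    have hcollen : ∀ r ∈ pvColFn (g.take n.toNat) m.toNat, n.toNat ≤ r.length := by
      intro r hr
      simp only [pvColFn, List.mem_map, List.mem_range] at hr
      obtain ⟨j, hj, rfl⟩ := hr
      simp only [List.length_map, List.length_take]
      omega
    have hb2 : pvScanA (pvColFn (g.take n.toNat) m.toNat) n (PySem.List.pyRange 0 m 1) []
        = pvScanRows n (pvColFn (g.take n.toNat) m.toNat) 0 [] := by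
      have h := pvScanBridge (pvColFn (g.take n.toNat) m.toNat) n m.toNat 0 []
        (by simp only [hcolslen]; omega)
      simp only [Nat.cast_zero, Nat.zero_add, List.drop_zero] at h
      rw [Int.toNat_of_nonneg hm.le] at h
      rwa [List.take_of_length_le hcolslen.le] at h
    have hmas2 := pvMaster n.toNat hwn (pvColFn (g.take n.toNat) m.toNat) hcollen n n rfl rfl
    rw [show (((pvColFn (g.take n.toNat) m.toNat).length : Nat) : Int) = m by
      rw [hcolslen]; exact Int.toNat_of_nonneg hm.le] at hmas2
    have hf2 : ((pvScanA (pvBuildCols g n m) n (PySem.List.pyRange 0 m 1) []).2 &&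
        pvCheckStripes (pvScanA (pvBuildCols g n m) n (PySem.List.pyRange 0 m 1) []).1)
        = pvStripesOk ((PySem.List.pyRange 0 m 1).map
            (fun j => (PySem.List.slice g none (some n)).map (fun r => PySem.List.pyGetD r j ' ')))
            m n := by
      rw [hcolsA, hcolsB, hb2, hmas2]
    simp only [hf1, hf2]
  · have hf2A : pvScanA (pvBuildCols g n m) n (PySem.List.pyRange 0 m 1) [] = ([], true) := by
      rw [PySem.List.pyRange_one_eq_nil hm0]
      rfl
    have hf2B : pvStripesOk ((PySem.List.pyRange 0 m 1).map
        (fun j => (PySem.List.slice g none (some n)).map (fun r => PySem.List.pyGetD r j ' ')))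
        m n = false := by
      unfold pvStripesOk
      rw [if_pos (by simp; omega)]
    have hf1A : ((pvScanA g m (PySem.List.pyRange 0 n 1) []).2 &&
        pvCheckStripes (pvScanA g m (PySem.List.pyRange 0 n 1) []).1) = false := by
      by_cases hn0 : n ≤ 0
      · rw [PySem.List.pyRange_one_eq_nil hn0]
        rfl
      · have hne : (flag.headD "").toList ≠ [] := by
          rcases hdeg with h | h
          · omega
          · exact h
        cases flag with
        | nil => simp at hne
        | cons s rest =>
          rw [PySem.List.pyRange_one_cons (by omega : (0 : Int) < n)]
          unfold pvScanA
          rw [if_neg (by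
            simp only [hg, List.map_cons, PySem.List.pyGetD_zero_cons]
            rw [show m.toNat = 0 by omega]
            simpa using hne)]
          rfl
    have hf1B : pvStripesOk (PySem.List.slice g none (some n)) n m = false := by
      by_cases hn0 : n ≤ 0
      · unfold pvStripesOk
        rw [if_pos (by simp; omega)]
      · have hne : (flag.headD "").toList ≠ [] := by
          rcases hdeg with h | h
          · omega
          · exact h
        apply pvStripesOk_degen _ _ _ hm0
        rw [PySem.List.slice_to (xs := g) (b := n) (by omega : (0 : Int) ≤ n)]
        cases flag with
        | nil => simp at hne
        | cons s rest =>
          obtain ⟨t', ht'⟩ : ∃ t', n.toNat = t' + 1 := ⟨n.toNat - 1, by omega⟩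
          rw [ht']
          simp only [hg, List.map_cons, List.take_succ_cons, List.headD_cons]
          simpa using hne
    simp only [hf1A, hf1B, hf2A, hf2B]
    rfl
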